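-- pv_equiv track=rewrite | github.com/JoaquinSBE/Transportistas | app.py | calcular_cuil
-- ===== SOURCE A (Python) =====
-- def calcular_cuil(dni_str: str, gender: str | None) -> str:
--     digits = ''.join(ch for ch in (dni_str or '') if ch.isdigit()).zfill(8)
--     if len(digits) != 8:
--         return ""
--     g = (gender or "").upper()
--     pref = 20 if g == "M" else (27 if g == "F" else 23)
--     weights = [5,4,3,2,7,6,5,4,3,2]
--     def calc_dv(prefijo: int):
--         base = f"{prefijo:02d}{digits}"
--         total = sum(int(d)*w for d, w in zip(base, weights))
--         dv = 11 - (total % 11)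
--         if dv == 11: return 0
--         if dv == 10: return None
--         return dv
--     dv = calc_dv(pref)
--     if dv is None:
--         pref = 23
--         dv = calc_dv(pref)
--         if dv is None:
--             pref = 24
--             dv = calc_dv(pref)
--             if dv is None:
--                 return ""
--     return f"{pref:02d}{digits}{dv}"
-- ===== SOURCE B (Python) =====
-- def calcular_cuil(dni_str: str, gender: str | None) -> str:
--     # Closed form: a prefix p fails the mod-11 check iff (head(p) + tail) % 11 == 1,
--     # where head(20)=10, head(23)=22, head(24)=26, head(27)=38. Working through
--     # A's fallback chain (first, 23, 24) shows the chosen prefix depends only on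
--     # r = tail % 11, so we pick it directly; no candidate loop and no retry.
--     digits = ''.join(ch for ch in (dni_str or '') if ch.isdigit()).zfill(8)
--     if len(digits) != 8:
--         return ""
--     g = (gender or "").upper()
--     tail = sum(int(d) * w for d, w in zip(digits, (3, 2, 7, 6, 5, 4, 3, 2)))
--     r = tail % 11
--     if g == "M":
--         pref, head = (23, 22) if r == 2 else (20, 10)
--     elif g == "F":
--         pref, head = (23, 22) if r == 7 else (27, 38)
--     else:
--         pref, head = (24, 26) if r == 1 else (23, 22)
--     return f"{pref:02d}{digits}{(-(head + tail)) % 11}"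
-- ===== Notes on version B (the rewrite author's own statement) =====
-- stated objective: alternative
-- what changed: Replaces A's trial-and-error fallback chain (compute calc_dv for the gender prefix, on failure retry 23, then 24) with a closed-form derivation: since a prefix fails exactly when (head(prefix)+tail) % 11 == 1, B computes r = tail % 11 once and picks the final prefix directly by case analysis on (gender, r), then emits the check digit as (-(head+tail)) % 11 -- no candidate loop, no retry, no dv None-sentinel.
import Mathlib
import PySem

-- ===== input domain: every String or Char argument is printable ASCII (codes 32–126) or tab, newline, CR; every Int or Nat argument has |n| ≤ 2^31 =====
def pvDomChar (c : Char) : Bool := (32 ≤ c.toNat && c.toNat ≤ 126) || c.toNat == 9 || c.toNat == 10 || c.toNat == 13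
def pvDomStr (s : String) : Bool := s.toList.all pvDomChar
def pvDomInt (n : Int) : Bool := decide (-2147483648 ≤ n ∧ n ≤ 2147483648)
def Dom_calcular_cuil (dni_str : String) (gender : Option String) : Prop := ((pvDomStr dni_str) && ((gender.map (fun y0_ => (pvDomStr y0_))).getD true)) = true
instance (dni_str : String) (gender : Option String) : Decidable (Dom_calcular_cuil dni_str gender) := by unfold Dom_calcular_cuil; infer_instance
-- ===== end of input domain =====

-- B replaces A's retry chain (try gender prefix, fall back to 23 then 24) with a
-- closed-form choice of the prefix from tail % 11, derived once; objective: alternative.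

-- ===== PORT A =====
-- Python's nested 'def calc_dv(prefijo)' closing over digits; int(d) on the (always
-- digit) chars of base is ported exactly as PySem.Int.ofChars? [d] with getD 0 (the
-- none case is unreachable: base consists of digit characters only).
def pvCalcDv (digits : List Char) (prefijo : Int) : Option Int :=
  let base := PySem.Chars.zfill (PySem.Int.toChars prefijo) 2 ++ digits  -- f"{prefijo:02d}{digits}"
  let weights : List Int := [5, 4, 3, 2, 7, 6, 5, 4, 3, 2]
  let total : Int :=
    (base.zip weights).foldl (fun acc dw => acc + (PySem.Int.ofChars? [dw.1]).getD 0 * dw.2) 0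
  let dv := 11 - PySem.Int.mod total 11
  if dv = 11 then some 0
  else if dv = 10 then none
  else some dv

def calcular_cuil (dni_str : String) (gender : Option String) : String :=
  let digits := PySem.Chars.zfill (dni_str.toList.filter PySem.Chars.isdigit) 8
  if digits.length ≠ 8 then ""
  else
    let g := PySem.Chars.upper (gender.getD "").toList
    let pref : Int := if g = ['M'] then 20 else if g = ['F'] then 27 else 23
    match pvCalcDv digits pref with
    | some dv => String.mk (PySem.Chars.zfill (PySem.Int.toChars pref) 2 ++ digits ++ PySem.Int.toChars dv)
    | none =>
      match pvCalcDv digits 23 with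
      | some dv => String.mk (PySem.Chars.zfill (PySem.Int.toChars (23 : Int)) 2 ++ digits ++ PySem.Int.toChars dv)
      | none =>
        match pvCalcDv digits 24 with
        | some dv => String.mk (PySem.Chars.zfill (PySem.Int.toChars (24 : Int)) 2 ++ digits ++ PySem.Int.toChars dv)
        | none => ""

-- ===== PORT B =====
-- closed-form prefix selection from r = tail % 11 (no candidate loop, no retry)
def calcular_cuil_alt (dni_str : String) (gender : Option String) : String :=
  let digits := PySem.Chars.zfill (dni_str.toList.filter PySem.Chars.isdigit) 8
  if digits.length ≠ 8 then ""
  else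
    let g := PySem.Chars.upper (gender.getD "").toList
    let tail : Int :=
      (digits.zip ([3, 2, 7, 6, 5, 4, 3, 2] : List Int)).foldl
        (fun acc dw => acc + (PySem.Int.ofChars? [dw.1]).getD 0 * dw.2) 0
    let r := PySem.Int.mod tail 11
    let ph : Int × Int :=
      if g = ['M'] then (if r = 2 then (23, 22) else (20, 10))
      else if g = ['F'] then (if r = 7 then (23, 22) else (27, 38))
      else (if r = 1 then (24, 26) else (23, 22))
    String.mk (PySem.Chars.zfill (PySem.Int.toChars ph.1) 2 ++ digits ++
      PySem.Int.toChars (PySem.Int.mod (-(ph.2 + tail)) 11))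

-- ===== PRECONDITION & SPEC =====
def Spec_calcular_cuil (dni_str : String) (gender : Option String) (out : String) : Prop := out = calcular_cuil_alt dni_str gender
instance (dni_str : String) (gender : Option String) (out : String) : Decidable (Spec_calcular_cuil dni_str gender out) := by unfold Spec_calcular_cuil; infer_instance

-- ===== CLAIM (what is proved, stated in full; the proofs are below) =====
def Claim_equal_calcular_cuil : Prop := ∀ (dni_str : String) (gender : Option String), Dom_calcular_cuil dni_str gender → Spec_calcular_cuil dni_str gender (calcular_cuil dni_str gender)

-- ===== LEMMAS AND PROOFS =====

-- folding '+ g x' from any start shifts the start out front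
lemma pvFoldShift (l : List (Char × Int)) (s : Int) :
    l.foldl (fun acc dw => acc + (PySem.Int.ofChars? [dw.1]).getD 0 * dw.2) s
      = s + l.foldl (fun acc dw => acc + (PySem.Int.ofChars? [dw.1]).getD 0 * dw.2) 0 := by
  induction l generalizing s with
  | nil => simp
  | cons x xs ih =>
    simp only [List.foldl_cons]
    rw [ih, ih ((0 : Int) + _)]
    ring

-- A's dv branching (11→0, 10→None) in arithmetic form: invalid iff total % 11 = 1,
-- otherwise dv = (-total) % 11
lemma pvDvOpt (T : Int) :
    (if 11 - PySem.Int.mod T 11 = 11 then some (0 : Int)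
     else if 11 - PySem.Int.mod T 11 = 10 then none
     else some (11 - PySem.Int.mod T 11))
      = (if PySem.Int.mod T 11 = 1 then none else some (PySem.Int.mod (-T) 11)) := by
  have hm : PySem.Int.mod T 11 = T % 11 := by simp [PySem.Int.mod, Int.fmod_eq_emod]
  have hm2 : PySem.Int.mod (-T) 11 = (-T) % 11 := by simp [PySem.Int.mod, Int.fmod_eq_emod]
  rw [hm, hm2]
  have hlt : T % 11 < 11 := Int.emod_lt_of_pos _ (by norm_num)
  have hge : 0 ≤ T % 11 := Int.emod_nonneg _ (by norm_num)
  by_cases h0 : T % 11 = 0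
  · have : (-T) % 11 = 0 := by omega
    simp [h0, this]
  · by_cases h1 : T % 11 = 1
    · simp [h1]
    · have hv : (-T) % 11 = 11 - T % 11 := by omega
      have hne11 : ¬ (11 - T % 11 = 11) := by omega
      have hne10 : ¬ (11 - T % 11 = 10) := by omega
      simp [h1, hne11, hne10, hv]

-- one calc_dv attempt of A in arithmetic form, for a 2-digit prefix with head sum h
lemma pvCalcLem (digits : List Char) (tail : Int)
    (htail : tail = (digits.zip ([3, 2, 7, 6, 5, 4, 3, 2] : List Int)).foldl
        (fun acc dw => acc + (PySem.Int.ofChars? [dw.1]).getD 0 * dw.2) 0)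
    (p : Int) (c0 c1 : Char) (h : Int)
    (hz : PySem.Chars.zfill (PySem.Int.toChars p) 2 = [c0, c1])
    (hh : (0 : Int) + (PySem.Int.ofChars? [c0]).getD 0 * 5 + (PySem.Int.ofChars? [c1]).getD 0 * 4 = h) :
    pvCalcDv digits p
      = (if PySem.Int.mod (h + tail) 11 = 1 then none
         else some (PySem.Int.mod (-(h + tail)) 11)) := by
  simp only [pvCalcDv, hz]
  have hbase : ([c0, c1] ++ digits).zip ([5, 4, 3, 2, 7, 6, 5, 4, 3, 2] : List Int)
      = (c0, (5 : Int)) :: (c1, 4) :: digits.zip ([3, 2, 7, 6, 5, 4, 3, 2] : List Int) := by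
    simp [List.zip]
  rw [hbase]
  simp only [List.foldl_cons]
  rw [pvFoldShift, hh, ← htail]
  exact pvDvOpt (h + tail)

-- ===== VERDICT (by name: the statement is the Claim_ definition above) =====
theorem calcular_cuil_spec : Claim_equal_calcular_cuil := by
  intro dni_str gender _
  unfold Spec_calcular_cuil calcular_cuil calcular_cuil_alt
  set digits := PySem.Chars.zfill (dni_str.toList.filter PySem.Chars.isdigit) 8 with hd
  by_cases hlen : digits.length ≠ 8
  · rw [if_pos hlen, if_pos hlen]
  · rw [if_neg hlen, if_neg hlen]
    set g := PySem.Chars.upper (gender.getD "").toList with hg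
    set tail : Int := (digits.zip ([3, 2, 7, 6, 5, 4, 3, 2] : List Int)).foldl
        (fun acc dw => acc + (PySem.Int.ofChars? [dw.1]).getD 0 * dw.2) 0 with htail
    have hmod : ∀ T : Int, PySem.Int.mod T 11 = T % 11 := by
      intro T; simp [PySem.Int.mod, Int.fmod_eq_emod]
    have hc20 := pvCalcLem digits tail htail 20 '2' '0' 10 (by decide) (by decide)
    have hc23 := pvCalcLem digits tail htail 23 '2' '3' 22 (by decide) (by decide)
    have hc24 := pvCalcLem digits tail htail 24 '2' '4' 26 (by decide) (by decide)
    have hc27 := pvCalcLem digits tail htail 27 '2' '7' 38 (by decide) (by decide)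
    have hlt : tail % 11 < 11 := Int.emod_lt_of_pos _ (by norm_num)
    have hge : 0 ≤ tail % 11 := Int.emod_nonneg _ (by norm_num)
    by_cases hM : g = ['M']
    · by_cases hr : tail % 11 = 2
      · have h1 : (10 + tail) % 11 = 1 := by omega
        have h2 : ¬ (22 + tail) % 11 = 1 := by omega
        simp [hM, hc20, hc23, hr, h1, h2]
      · have h1 : ¬ (10 + tail) % 11 = 1 := by omega
        simp [hM, hc20, hr, h1]
    · by_cases hF : g = ['F']
      · by_cases hr : tail % 11 = 7
        · have h1 : (38 + tail) % 11 = 1 := by omega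
          have h2 : ¬ (22 + tail) % 11 = 1 := by omega
          simp [hF, hc27, hc23, hr, h1, h2]
        · have h1 : ¬ (38 + tail) % 11 = 1 := by omega
          simp [hF, hc27, hr, h1]
      · by_cases hr : tail % 11 = 1
        · have h1 : (22 + tail) % 11 = 1 := by omega
          have h2 : ¬ (26 + tail) % 11 = 1 := by omega
          simp [hM, hF, hc23, hc24, hmod, hr, h1, h2]
        · have h1 : ¬ (22 + tail) % 11 = 1 := by omega
          simp [hM, hF, hc23, hmod, hr, h1]
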